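-- pv_equiv track=rewrite | github.com/TseWeiKuo/Landing | kinematic_utilities.py | all_elements_in_between
-- ===== SOURCE A (Python) =====
-- def all_elements_in_between(list1, list2):
--     """
--     Check if each element in list1 is between two consecutive elements in sorted list2.
--
--     Parameters:
--     ----------
--     list1 : list of floats or ints
--     list2 : list of floats or ints (must have len >= 2)
--
--     Returns:
--     -------
--     True if all elements in list1 fall strictly between consecutive elements of list2.
--     """
--     list2 = sorted(list2)
--     for x in list1:
--         found = False
--         for a, b in zip(list2, list2[1:]):
--             if a < x < b:
--                 found = True
--                 break
--         if not found:
--             return False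
--     return True
-- ===== SOURCE B (Python) =====
-- def all_elements_in_between(list1, list2):
--     if not list1:
--         return True
--     if not list2:
--         return False
--     lo = min(list2)
--     hi = max(list2)
--     present = set(list2)
--     return all(lo < x < hi and x not in present for x in list1)
-- ===== Notes on version B (the rewrite author's own statement) =====
-- stated objective: faster
-- what changed: Replaces the sort plus per-element scan over consecutive pairs by a single min/max/set precomputation: x lies strictly between some consecutive pair of sorted list2 iff min(list2) < x < max(list2) and x is not an element of list2.
import Mathlib
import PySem

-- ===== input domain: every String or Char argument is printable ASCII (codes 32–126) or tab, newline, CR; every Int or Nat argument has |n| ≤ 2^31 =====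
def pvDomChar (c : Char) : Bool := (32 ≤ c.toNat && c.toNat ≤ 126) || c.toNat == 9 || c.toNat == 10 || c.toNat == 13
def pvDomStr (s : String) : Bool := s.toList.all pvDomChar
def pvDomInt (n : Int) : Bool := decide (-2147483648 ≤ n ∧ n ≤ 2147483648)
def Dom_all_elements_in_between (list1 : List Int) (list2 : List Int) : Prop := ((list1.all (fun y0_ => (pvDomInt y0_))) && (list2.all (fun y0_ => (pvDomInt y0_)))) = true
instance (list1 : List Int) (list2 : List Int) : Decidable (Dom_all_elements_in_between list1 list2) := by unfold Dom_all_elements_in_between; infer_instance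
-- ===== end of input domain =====

-- B replaces A's per-element scan over consecutive sorted pairs by one min/max/set precomputation (asymptotically faster as timed).

-- ===== PORT A =====
-- inner 'for a, b in zip(list2, list2[1:]): if a < x < b: found = True; break'
def pvInnerA (x : Int) : List (Int × Int) → Bool
  | [] => false
  | (a, b) :: rest => if a < x ∧ x < b then true else pvInnerA x rest

-- outer 'for x in list1: … if not found: return False' / 'return True'
def pvLoopA (l2s : List Int) : List Int → Bool
  | [] => true
  | x :: rest =>
    if pvInnerA x (l2s.zip (PySem.List.slice l2s (some 1) none)) then pvLoopA l2s rest
    else false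

def all_elements_in_between (list1 : List Int) (list2 : List Int) : Bool :=
  pvLoopA (PySem.List.sorted list2 (fun x => x) false) list1

-- ===== PORT B =====
def all_elements_in_between_alt (list1 : List Int) (list2 : List Int) : Bool :=
  if list1 = [] then true
  else if list2 = [] then false
  else
    match PySem.List.min? list2 (fun x => x), PySem.List.max? list2 (fun x => x) with
    | some lo, some hi =>
      let present := PySem.Set.ofList list2
      list1.all (fun x => decide (lo < x) && decide (x < hi) && !(PySem.Set.contains present x))
    | _, _ => false

-- ===== PRECONDITION & SPEC =====
def Spec_all_elements_in_between (list1 : List Int) (list2 : List Int) (out : Bool) : Prop := out = all_elements_in_between_alt list1 list2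
instance (list1 : List Int) (list2 : List Int) (out : Bool) : Decidable (Spec_all_elements_in_between list1 list2 out) := by unfold Spec_all_elements_in_between; infer_instance

-- ===== CLAIM (what is proved, stated in full; the proofs are below) =====
def Claim_equal_all_elements_in_between : Prop := ∀ (list1 : List Int) (list2 : List Int), Dom_all_elements_in_between list1 list2 → Spec_all_elements_in_between list1 list2 (all_elements_in_between list1 list2)

-- ===== LEMMAS AND PROOFS =====

-- On a ≤-sorted list, the inner scan finds a consecutive pair strictly around x
-- iff some element is below x, some element is above x, and x itself is absent.
theorem pvInnerA_iff (x : Int) (l : List Int) (h : l.Pairwise (· ≤ ·)) :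
    pvInnerA x (l.zip l.tail) = true ↔ (∃ a ∈ l, a < x) ∧ (∃ b ∈ l, x < b) ∧ x ∉ l := by
  induction l with
  | nil => simp [pvInnerA]
  | cons a t ih =>
    cases t with
    | nil =>
      constructor
      · intro hc; simp [pvInnerA] at hc
      · rintro ⟨⟨a', ha', h1⟩, ⟨b', hb', h2⟩, _⟩
        simp only [List.tail, List.mem_singleton] at ha' hb'
        exfalso; subst ha'; subst hb'; omega
    | cons b t' =>
      rcases List.pairwise_cons.mp h with ⟨hale, ht⟩
      rcases List.pairwise_cons.mp ht with ⟨hble, _⟩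
      have ihr := ih ht
      simp only [List.tail] at ihr ⊢
      simp only [List.zip_cons_cons, pvInnerA]
      by_cases hab : a < x ∧ x < b
      · rw [if_pos hab]
        refine ⟨fun _ => ?_, fun _ => rfl⟩
        refine ⟨⟨a, by simp, hab.1⟩, ⟨b, by simp, hab.2⟩, ?_⟩
        intro hx
        rcases List.mem_cons.mp hx with h1 | h1
        · omega
        · rcases List.mem_cons.mp h1 with h2 | h2
          · omega
          · have := hble _ h2; omega
      · rw [if_neg hab, ihr]
        constructor
        · rintro ⟨⟨a', ha', h1⟩, ⟨b', hb', h2⟩, h3⟩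
          have haa' : a ≤ a' := hale _ ha'
          refine ⟨⟨a', List.mem_cons_of_mem _ ha', h1⟩, ⟨b', List.mem_cons_of_mem _ hb', h2⟩, ?_⟩
          intro hx
          rcases List.mem_cons.mp hx with h4 | h4
          · omega
          · exact h3 h4
        · rintro ⟨⟨a', ha', h1⟩, ⟨b', hb', h2⟩, h3⟩
          have hxb : b < x := by
            have hxne : x ≠ b := fun he => h3 (by simp [he])
            by_contra hle
            refine hab ⟨?_, by omega⟩
            rcases List.mem_cons.mp ha' with h4 | h4
            · omega
            · rcases List.mem_cons.mp h4 with h5 | h5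
              · omega
              · have := hble _ h5; omega
          refine ⟨⟨b, by simp, hxb⟩, ⟨b', ?_, h2⟩, fun hx => h3 (List.mem_cons_of_mem _ hx)⟩
          rcases List.mem_cons.mp hb' with h4 | h4
          · exfalso; have := hale b (by simp); omega
          · exact h4

theorem pvAll_congr {α : Type} (l : List α) (f g : α → Bool)
    (h : ∀ x ∈ l, f x = g x) : l.all f = l.all g := by
  induction l with
  | nil => rfl
  | cons a t ih =>
    simp only [List.all_cons, h a (by simp), ih (fun x hx => h x (List.mem_cons_of_mem _ hx))]

theorem pvLoopA_eq_all (l2s : List Int) (l : List Int) :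
    pvLoopA l2s l = l.all (fun x => pvInnerA x (l2s.zip (PySem.List.slice l2s (some 1) none))) := by
  induction l with
  | nil => rfl
  | cons a t ih =>
    simp only [pvLoopA, List.all_cons, ih]
    cases hb : pvInnerA a (l2s.zip (PySem.List.slice l2s (some 1) none)) <;> simp [hb]

-- ===== VERDICT (by name: the statement is the Claim_ definition above) =====
theorem all_elements_in_between_spec : Claim_equal_all_elements_in_between := by
  intro list1 list2 _
  unfold Spec_all_elements_in_between all_elements_in_between all_elements_in_between_alt
  by_cases h1 : list1 = []
  · subst h1; simp [pvLoopA]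
  · simp only [h1, if_false]
    set l2s := PySem.List.sorted list2 (fun x => x) false with hl2s
    by_cases h2 : list2 = []
    · subst h2
      rw [if_pos rfl]
      have hnil : l2s = [] := by rw [hl2s]; rfl
      rw [hnil]
      cases list1 with
      | nil => exact absurd rfl h1
      | cons a t => simp [pvLoopA, PySem.List.slice, pvInnerA]
    · rw [if_neg h2]
      rcases hmin : PySem.List.min? list2 (fun x => x) with _ | lo
      · rw [PySem.List.min?_eq_none_iff] at hmin; exact absurd hmin h2
      rcases hmax : PySem.List.max? list2 (fun x => x) with _ | hi
      · rw [PySem.List.max?_eq_none_iff] at hmax; exact absurd hmax h2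
      have hpw : l2s.Pairwise (· ≤ ·) := PySem.List.sorted_pairwise list2 (fun x => x)
      have hmem : ∀ y : Int, y ∈ l2s ↔ y ∈ list2 :=
        fun y => PySem.List.mem_sorted list2 (fun x => x) false y
      have hlomem : lo ∈ list2 := PySem.List.min?_mem hmin
      have hlomin : ∀ y ∈ list2, lo ≤ y := PySem.List.min?_isMin hmin
      have hhimem : hi ∈ list2 := PySem.List.max?_mem hmax
      have hhimax : ∀ y ∈ list2, y ≤ hi := PySem.List.max?_isMax hmax
      rw [pvLoopA_eq_all]
      apply pvAll_congr
      intro x _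
      rw [PySem.List.slice_from_one]
      have hset : (PySem.Set.contains (PySem.Set.ofList list2) x = true) ↔ x ∈ list2 := by
        rw [PySem.Set.contains_iff, PySem.Set.mem_ofList]
      rw [Bool.eq_iff_iff, pvInnerA_iff x l2s hpw]
      simp only [Bool.and_eq_true, decide_eq_true_eq, Bool.not_eq_true', ← Bool.not_eq_true, hset]
      constructor
      · rintro ⟨⟨a, ha, ha1⟩, ⟨b, hb', hb1⟩, hx⟩
        have ha2 := (hmem a).mp ha
        have hb2 := (hmem b).mp hb'
        exact ⟨⟨by have := hlomin _ ha2; omega, by have := hhimax _ hb2; omega⟩,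
               fun hxin => hx ((hmem x).mpr hxin)⟩
      · rintro ⟨⟨hlt1, hlt2⟩, h3⟩
        exact ⟨⟨lo, (hmem lo).mpr hlomem, hlt1⟩, ⟨hi, (hmem hi).mpr hhimem, hlt2⟩,
               fun hx => h3 ((hmem x).mp hx)⟩
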